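-- pv_equiv track=rewrite | github.com/a89cheng/Canbase-Reinvented | src/analytics/utility.py | Eco_to_opening
-- ===== SOURCE A (Python) =====
-- def Eco_to_opening(Eco_code):
--     """ECO (encyclopedia of chess openings) conversion to Opening name"""
--
--     #Dictionary of generic Eco opening codes to their respective openings
--     mapping_dict = {
--         "A00": "Polish Opening",
--         "A01": "Nimzovich-Larsen Attack",
--         "A02-A03": "Bird's Opening",
--         "A04-A09": "Reti Opening",
--         "A10-A39": "English Opening",
--         "A40": "Queen's Pawn Opening",
--         "A41-A42": "Modern Defence",
--         "A43-A44": "Old Benoni Defence",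
--         "A45": "Trompowsky Attack",
--         "A46-A49": "Indian Defence",
--         "A50": "Budapest Gambit Declined",
--         "A51-A52": "Budapest Gambit",
--         "A53-A55": "Old Indian Defence",
--         "A56-A59": "Benko Gambit",
--         "A60-A79": "Modern Benoni",
--         "A80-A99": "Dutch Defence",
--         "B00": "King's Pawn Opening",
--         "B01": "Scandinavian Defence",
--         "B02-B05": "Alekhine's Defence",
--         "B06": "Modern Defence",
--         "B07-B09": "Pirc Defence",
--         "B10-B19": "Caro-Kann Defence",
--         "B20-B99": "Sicilian Defence",
--         "C00-C19": "French Defence",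
--         "C20": "King's Pawn Game",
--         "C21-C22": "Centre Game",
--         "C23-C24": "Bishop's Opening",
--         "C25-C29": "Vienna Game",
--         "C30-C39": "King's Gambit",
--         "C40": "King's Knight Opening",
--         "C41": "Philidor Defence",
--         "C42-C43": "Petrov's Defence",
--         "C44": "Scotch Gambit",
--         "C45": "Scotch Game",
--         "C46": "Three Knights Game",
--         "C47-C49": "Four Knights Game",
--         "C50-C59": "Italian Game",
--         "C60-C99": "Ruy Lopez",
--         "D00-D05": "Queen's Pawn Game",
--         "D06-D09": "Queen's Gambit Declined Slav",
--         "D10-D19": "Slav Defence",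
--         "D20-D29": "Queen's Gambit Accepted",
--         "D30-D69": "Queen's Gambit Declined",
--         "D70-D99": "Gruenfeld Defence",
--         "E00-E09": "Catalan Opening",
--         "E10-E19": "Queen's Indian Defence",
--         "E20-E59": "Nimzo-Indian Defence",
--         "E60-E99": "King's Indian Defence",
--     }
--
--     #If the eco code is not a string, it is unknown
--     if not isinstance(Eco_code, str):
--         return "Unknown"
--
--     #Iterates through each of the dictionary indices to find the right code;
--     for code, name in mapping_dict.items():
--         #There are sometimes ranges so we split them there
--         if "-" in code:
--             start, end = code.split("-")
--             if start <= Eco_code <= end: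
--                 opening_name = name
--                 return opening_name
--         else:
--             if Eco_code == code:
--                 opening_name = name
--                 return opening_name
--
--     return "Unknown Opening"
-- ===== SOURCE B (Python) =====
-- # ECO ranges packed one per row: chars 0-3 = start, 3-6 = end, 6- = opening name.
-- _ROWS = [
--     "A00A00Polish Opening",
--     "A01A01Nimzovich-Larsen Attack",
--     "A02A03Bird's Opening",
--     "A04A09Reti Opening",
--     "A10A39English Opening",
--     "A40A40Queen's Pawn Opening",
--     "A41A42Modern Defence",
--     "A43A44Old Benoni Defence",
--     "A45A45Trompowsky Attack",
--     "A46A49Indian Defence",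
--     "A50A50Budapest Gambit Declined",
--     "A51A52Budapest Gambit",
--     "A53A55Old Indian Defence",
--     "A56A59Benko Gambit",
--     "A60A79Modern Benoni",
--     "A80A99Dutch Defence",
--     "B00B00King's Pawn Opening",
--     "B01B01Scandinavian Defence",
--     "B02B05Alekhine's Defence",
--     "B06B06Modern Defence",
--     "B07B09Pirc Defence",
--     "B10B19Caro-Kann Defence",
--     "B20B99Sicilian Defence",
--     "C00C19French Defence",
--     "C20C20King's Pawn Game",
--     "C21C22Centre Game",
--     "C23C24Bishop's Opening",
--     "C25C29Vienna Game",
--     "C30C39King's Gambit",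
--     "C40C40King's Knight Opening",
--     "C41C41Philidor Defence",
--     "C42C43Petrov's Defence",
--     "C44C44Scotch Gambit",
--     "C45C45Scotch Game",
--     "C46C46Three Knights Game",
--     "C47C49Four Knights Game",
--     "C50C59Italian Game",
--     "C60C99Ruy Lopez",
--     "D00D05Queen's Pawn Game",
--     "D06D09Queen's Gambit Declined Slav",
--     "D10D19Slav Defence",
--     "D20D29Queen's Gambit Accepted",
--     "D30D69Queen's Gambit Declined",
--     "D70D99Gruenfeld Defence",
--     "E00E09Catalan Opening",
--     "E10E19Queen's Indian Defence",
--     "E20E59Nimzo-Indian Defence",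
--     "E60E99King's Indian Defence",
-- ]
--
--
-- def Eco_to_opening(Eco_code):
--     """ECO (encyclopedia of chess openings) conversion to Opening name"""
--     if not isinstance(Eco_code, str):
--         return "Unknown"
--     # binary search for the rightmost range start <= Eco_code
--     lo, hi = 0, len(_ROWS)
--     while lo < hi:
--         mid = (lo + hi) // 2
--         if Eco_code < _ROWS[mid][0:3]:
--             hi = mid
--         else:
--             lo = mid + 1
--     if lo > 0:
--         if Eco_code <= _ROWS[lo - 1][3:6]:
--             return _ROWS[lo - 1][6:]
--     return "Unknown Opening"
-- ===== Notes on version B (the rewrite author's own statement) =====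
-- stated objective: alternative
-- what changed: B stores the openings as a sorted fixed-layout packed-row table (row[0:3]=start, row[3:6]=end, row[6:]=name) and locates the single candidate range by binary search over the row prefixes, instead of A's linear first-match scan over the 50 dict entries that splits each hyphenated key as it goes.
import Mathlib
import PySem

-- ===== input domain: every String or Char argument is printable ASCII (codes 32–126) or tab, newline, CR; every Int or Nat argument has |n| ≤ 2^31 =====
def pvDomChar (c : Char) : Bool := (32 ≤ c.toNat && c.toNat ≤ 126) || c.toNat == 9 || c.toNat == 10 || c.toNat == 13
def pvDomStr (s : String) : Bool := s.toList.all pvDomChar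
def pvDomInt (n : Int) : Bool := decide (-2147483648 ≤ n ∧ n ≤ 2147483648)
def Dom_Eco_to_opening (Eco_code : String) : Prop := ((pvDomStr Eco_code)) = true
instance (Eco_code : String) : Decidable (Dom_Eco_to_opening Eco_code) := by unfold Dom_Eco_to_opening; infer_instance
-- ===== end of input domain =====

-- B packs the ECO table into sorted fixed-layout rows "startendName" and looks the code up by
-- binary search on the row prefixes, instead of A's linear first-match scan over the dict that
-- splits each hyphenated key as it goes (objective: alternative).


-- ===== PORT A =====
-- A's mapping_dict as an insertion-ordered association list of (code, name).
def ecoItems : List (String × String) := [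
  ("A00", "Polish Opening"),
  ("A01", "Nimzovich-Larsen Attack"),
  ("A02-A03", "Bird's Opening"),
  ("A04-A09", "Reti Opening"),
  ("A10-A39", "English Opening"),
  ("A40", "Queen's Pawn Opening"),
  ("A41-A42", "Modern Defence"),
  ("A43-A44", "Old Benoni Defence"),
  ("A45", "Trompowsky Attack"),
  ("A46-A49", "Indian Defence"),
  ("A50", "Budapest Gambit Declined"),
  ("A51-A52", "Budapest Gambit"),
  ("A53-A55", "Old Indian Defence"),
  ("A56-A59", "Benko Gambit"),
  ("A60-A79", "Modern Benoni"),
  ("A80-A99", "Dutch Defence"),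
  ("B00", "King's Pawn Opening"),
  ("B01", "Scandinavian Defence"),
  ("B02-B05", "Alekhine's Defence"),
  ("B06", "Modern Defence"),
  ("B07-B09", "Pirc Defence"),
  ("B10-B19", "Caro-Kann Defence"),
  ("B20-B99", "Sicilian Defence"),
  ("C00-C19", "French Defence"),
  ("C20", "King's Pawn Game"),
  ("C21-C22", "Centre Game"),
  ("C23-C24", "Bishop's Opening"),
  ("C25-C29", "Vienna Game"),
  ("C30-C39", "King's Gambit"),
  ("C40", "King's Knight Opening"),
  ("C41", "Philidor Defence"),
  ("C42-C43", "Petrov's Defence"),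
  ("C44", "Scotch Gambit"),
  ("C45", "Scotch Game"),
  ("C46", "Three Knights Game"),
  ("C47-C49", "Four Knights Game"),
  ("C50-C59", "Italian Game"),
  ("C60-C99", "Ruy Lopez"),
  ("D00-D05", "Queen's Pawn Game"),
  ("D06-D09", "Queen's Gambit Declined Slav"),
  ("D10-D19", "Slav Defence"),
  ("D20-D29", "Queen's Gambit Accepted"),
  ("D30-D69", "Queen's Gambit Declined"),
  ("D70-D99", "Gruenfeld Defence"),
  ("E00-E09", "Catalan Opening"),
  ("E10-E19", "Queen's Indian Defence"),
  ("E20-E59", "Nimzo-Indian Defence"),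
  ("E60-E99", "King's Indian Defence")]

-- A's `for code, name in mapping_dict.items()` loop, first match wins.
-- Python string comparison is code-point lexicographic = Lean's order on `.toList` (per PySem).
def ecoLookup (items : List (String × String)) (s : String) : String :=
  match items with
  | [] => "Unknown Opening"
  | (code, name) :: rest =>
    if PySem.Str.isIn "-" code = true then
      match PySem.Str.split? code "-" with
      | some [start, stop] =>
        if start.toList ≤ s.toList ∧ s.toList ≤ stop.toList then name else ecoLookup rest s
      | _ => "Unknown Opening"  -- Python raises on unpacking here; unreachable for this literal table
    else
      if s = code then name else ecoLookup rest s

-- The `isinstance` guard ("Unknown") never fires: the argument is a str by type.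
def Eco_to_opening (Eco_code : String) : String := ecoLookup ecoItems Eco_code

-- ===== PORT B =====
-- Source B's _ROWS: each row packs one range as row[0:3] = start, row[3:6] = end, row[6:] = name.
def ecoRows : List String := [
  "A00A00Polish Opening",
  "A01A01Nimzovich-Larsen Attack",
  "A02A03Bird's Opening",
  "A04A09Reti Opening",
  "A10A39English Opening",
  "A40A40Queen's Pawn Opening",
  "A41A42Modern Defence",
  "A43A44Old Benoni Defence",
  "A45A45Trompowsky Attack",
  "A46A49Indian Defence",
  "A50A50Budapest Gambit Declined",
  "A51A52Budapest Gambit",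
  "A53A55Old Indian Defence",
  "A56A59Benko Gambit",
  "A60A79Modern Benoni",
  "A80A99Dutch Defence",
  "B00B00King's Pawn Opening",
  "B01B01Scandinavian Defence",
  "B02B05Alekhine's Defence",
  "B06B06Modern Defence",
  "B07B09Pirc Defence",
  "B10B19Caro-Kann Defence",
  "B20B99Sicilian Defence",
  "C00C19French Defence",
  "C20C20King's Pawn Game",
  "C21C22Centre Game",
  "C23C24Bishop's Opening",
  "C25C29Vienna Game",
  "C30C39King's Gambit",
  "C40C40King's Knight Opening",
  "C41C41Philidor Defence",
  "C42C43Petrov's Defence",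
  "C44C44Scotch Gambit",
  "C45C45Scotch Game",
  "C46C46Three Knights Game",
  "C47C49Four Knights Game",
  "C50C59Italian Game",
  "C60C99Ruy Lopez",
  "D00D05Queen's Pawn Game",
  "D06D09Queen's Gambit Declined Slav",
  "D10D19Slav Defence",
  "D20D29Queen's Gambit Accepted",
  "D30D69Queen's Gambit Declined",
  "D70D99Gruenfeld Defence",
  "E00E09Catalan Opening",
  "E10E19Queen's Indian Defence",
  "E20E59Nimzo-Indian Defence",
  "E60E99King's Indian Defence"]

-- Source B's `while lo < hi` binary-search loop; fuel = list length bounds the iterations.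
def bsLoop (s : String) (fuel lo hi : Nat) : Nat :=
  match fuel with
  | 0 => lo
  | fuel + 1 =>
    if lo < hi then
      let mid := (lo + hi) / 2
      if s.toList < (PySem.Str.slice (ecoRows.getD mid "") (some 0) (some 3)).toList then
        bsLoop s fuel lo mid
      else bsLoop s fuel (mid + 1) hi
    else lo

def Eco_to_opening_alt (Eco_code : String) : String :=
  let lo := bsLoop Eco_code ecoRows.length 0 ecoRows.length
  if 0 < lo then
    if Eco_code.toList ≤ (PySem.Str.slice (ecoRows.getD (lo - 1) "") (some 3) (some 6)).toList then
      PySem.Str.slice (ecoRows.getD (lo - 1) "") (some 6) none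
    else "Unknown Opening"
  else "Unknown Opening"

-- ===== PRECONDITION & SPEC =====
def Spec_Eco_to_opening (Eco_code : String) (out : String) : Prop := out = Eco_to_opening_alt Eco_code
instance (Eco_code : String) (out : String) : Decidable (Spec_Eco_to_opening Eco_code out) := by unfold Spec_Eco_to_opening; infer_instance

-- ===== CLAIM (what is proved, stated in full; the proofs are below) =====
def Claim_equal_Eco_to_opening : Prop := ∀ (Eco_code : String), Dom_Eco_to_opening Eco_code → Spec_Eco_to_opening Eco_code (Eco_to_opening Eco_code)

-- ===== LEMMAS AND PROOFS =====

-- proof-side reference table: B's packed rows unpacked into (start, end, name) triples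
def ecoTable : List (String × String × String) := [
  ("A00", "A00", "Polish Opening"),
  ("A01", "A01", "Nimzovich-Larsen Attack"),
  ("A02", "A03", "Bird's Opening"),
  ("A04", "A09", "Reti Opening"),
  ("A10", "A39", "English Opening"),
  ("A40", "A40", "Queen's Pawn Opening"),
  ("A41", "A42", "Modern Defence"),
  ("A43", "A44", "Old Benoni Defence"),
  ("A45", "A45", "Trompowsky Attack"),
  ("A46", "A49", "Indian Defence"),
  ("A50", "A50", "Budapest Gambit Declined"),
  ("A51", "A52", "Budapest Gambit"),
  ("A53", "A55", "Old Indian Defence"),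
  ("A56", "A59", "Benko Gambit"),
  ("A60", "A79", "Modern Benoni"),
  ("A80", "A99", "Dutch Defence"),
  ("B00", "B00", "King's Pawn Opening"),
  ("B01", "B01", "Scandinavian Defence"),
  ("B02", "B05", "Alekhine's Defence"),
  ("B06", "B06", "Modern Defence"),
  ("B07", "B09", "Pirc Defence"),
  ("B10", "B19", "Caro-Kann Defence"),
  ("B20", "B99", "Sicilian Defence"),
  ("C00", "C19", "French Defence"),
  ("C20", "C20", "King's Pawn Game"),
  ("C21", "C22", "Centre Game"),
  ("C23", "C24", "Bishop's Opening"),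
  ("C25", "C29", "Vienna Game"),
  ("C30", "C39", "King's Gambit"),
  ("C40", "C40", "King's Knight Opening"),
  ("C41", "C41", "Philidor Defence"),
  ("C42", "C43", "Petrov's Defence"),
  ("C44", "C44", "Scotch Gambit"),
  ("C45", "C45", "Scotch Game"),
  ("C46", "C46", "Three Knights Game"),
  ("C47", "C49", "Four Knights Game"),
  ("C50", "C59", "Italian Game"),
  ("C60", "C99", "Ruy Lopez"),
  ("D00", "D05", "Queen's Pawn Game"),
  ("D06", "D09", "Queen's Gambit Declined Slav"),
  ("D10", "D19", "Slav Defence"),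
  ("D20", "D29", "Queen's Gambit Accepted"),
  ("D30", "D69", "Queen's Gambit Declined"),
  ("D70", "D99", "Gruenfeld Defence"),
  ("E00", "E09", "Catalan Opening"),
  ("E10", "E19", "Queen's Indian Defence"),
  ("E20", "E59", "Nimzo-Indian Defence"),
  ("E60", "E99", "King's Indian Defence")]

-- a packed row read the way the B port reads it
def parseRow (r : String) : String × String × String :=
  (PySem.Str.slice r (some 0) (some 3), PySem.Str.slice r (some 3) (some 6),
   PySem.Str.slice r (some 6) none)

set_option maxRecDepth 4000 in
theorem rows_parsed : ecoRows.map parseRow = ecoTable := by decide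

theorem rows_len : ecoRows.length = ecoTable.length := by
  have h := congrArg List.length rows_parsed
  simpa using h

theorem parse_at (j : Nat) (hj : j < ecoTable.length) :
    parseRow (ecoRows.getD j "") = ecoTable[j] := by
  have hlen : j < ecoRows.length := by rw [rows_len]; exact hj
  rw [List.getD_eq_getElem?_getD, List.getElem?_eq_getElem hlen, Option.getD_some]
  calc parseRow ecoRows[j] = (ecoRows.map parseRow)[j]'(by simpa using hlen) := by
        simp [List.getElem_map]
    _ = ecoTable[j] := List.getElem_of_eq rows_parsed _

theorem start_at (j : Nat) (hj : j < ecoTable.length) :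
    PySem.Str.slice (ecoRows.getD j "") (some 0) (some 3) = (ecoTable[j]).1 :=
  congrArg (fun t => t.1) (parse_at j hj)

theorem stop_at (j : Nat) (hj : j < ecoTable.length) :
    PySem.Str.slice (ecoRows.getD j "") (some 3) (some 6) = (ecoTable[j]).2.1 :=
  congrArg (fun t => t.2.1) (parse_at j hj)

theorem name_at (j : Nat) (hj : j < ecoTable.length) :
    PySem.Str.slice (ecoRows.getD j "") (some 6) none = (ecoTable[j]).2.2 :=
  congrArg (fun t => t.2.2) (parse_at j hj)

-- first-match scan over the range table: reference shape both ports are reduced to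
def scanT (t : List (String × String × String)) (s : String) : String :=
  match t with
  | [] => "Unknown Opening"
  | q :: rest => if q.1.toList ≤ s.toList ∧ s.toList ≤ q.2.1.toList then q.2.2 else scanT rest s

-- per-entry relation between A's dict key and B's (start, end) pair
def entryRel (code start stop : String) : Prop :=
  (PySem.Str.isIn "-" code = true ∧ PySem.Str.split? code "-" = some [start, stop]) ∨
  (PySem.Str.isIn "-" code = false ∧ code = start ∧ start = stop)

theorem lookup_eq_scan (s : String) :
    ∀ (items : List (String × String)) (t : List (String × String × String)),
    List.Forall₂ (fun p q => p.2 = q.2.2 ∧ entryRel p.1 q.1 q.2.1) items t →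
    ecoLookup items s = scanT t s := by
  intro items t h
  induction h with
  | nil => rfl
  | cons hpq _ ih =>
    rename_i p q items' t' _
    obtain ⟨hname, hrel⟩ := hpq
    obtain ⟨code, name⟩ := p
    obtain ⟨start, stop, nm⟩ := q
    dsimp only at hname hrel
    subst hname
    rcases hrel with ⟨hin, hsplit⟩ | ⟨hin, rfl, rfl⟩
    · simp only [ecoLookup, scanT, hin, hsplit, if_true]
      split <;> simp [ih]
    · simp only [ecoLookup, scanT, hin, Bool.false_eq_true, if_false]
      have : (s = code) ↔ (code.toList ≤ s.toList ∧ s.toList ≤ code.toList) := by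
        constructor
        · rintro rfl; exact ⟨le_refl _, le_refl _⟩
        · rintro ⟨h1, h2⟩
          have : s.toList = code.toList := le_antisymm h2 h1
          exact String.toList_inj.mp this
      split_ifs with h1 h2 h2
      · rfl
      · exact absurd (this.mp h1) h2
      · exact absurd (this.mpr h2) h1
      · exact ih

theorem ecoRel : List.Forall₂ (fun (p : String × String) (q : String × String × String) =>
    p.2 = q.2.2 ∧ entryRel p.1 q.1 q.2.1) ecoItems ecoTable := by
  unfold ecoItems ecoTable entryRel; decide

-- the range table is sorted and non-overlapping: end of an earlier range < start of a later one
theorem table_sep : List.Pairwise (fun (p q : String × String × String) =>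
    p.2.1.toList < q.1.toList) ecoTable := by
  unfold ecoTable; decide

theorem table_wf : ∀ q ∈ ecoTable, q.1.toList ≤ q.2.1.toList := by
  unfold ecoTable; decide

theorem table_sep_get {i j : Nat} (hi : i < ecoTable.length) (hj : j < ecoTable.length)
    (hij : i < j) : (ecoTable[i]).2.1.toList < (ecoTable[j]).1.toList :=
  (List.pairwise_iff_getElem.mp table_sep) i j hi hj hij

theorem starts_mono {i j : Nat} (hi : i < ecoTable.length) (hj : j < ecoTable.length)
    (hij : i ≤ j) : (ecoTable[i]).1.toList ≤ (ecoTable[j]).1.toList := by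
  rcases Nat.lt_or_ge i j with h | h
  · exact le_trans (table_wf _ (List.getElem_mem hi)) (le_of_lt (table_sep_get hi hj h))
  · have : i = j := le_antisymm hij h
    subst this; exact le_refl _

theorem bsLoop_spec (s : String) : ∀ (fuel lo hi : Nat), lo ≤ hi → hi ≤ ecoTable.length →
    hi - lo ≤ fuel →
    (∀ j (hj : j < ecoTable.length), j < lo → (ecoTable[j]).1.toList ≤ s.toList) →
    (∀ j (hj : j < ecoTable.length), hi ≤ j → s.toList < (ecoTable[j]).1.toList) →
    lo ≤ bsLoop s fuel lo hi ∧ bsLoop s fuel lo hi ≤ hi ∧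
    (∀ j (hj : j < ecoTable.length), j < bsLoop s fuel lo hi → (ecoTable[j]).1.toList ≤ s.toList) ∧
    (∀ j (hj : j < ecoTable.length), bsLoop s fuel lo hi ≤ j → s.toList < (ecoTable[j]).1.toList) := by
  intro fuel
  induction fuel with
  | zero =>
    intro lo hi hle hhi hfuel hlow hhigh
    have : lo = hi := by omega
    subst this
    exact ⟨le_refl _, le_refl _, by simpa [bsLoop] using hlow, by simpa [bsLoop] using hhigh⟩
  | succ fuel ih =>
    intro lo hi hle hhi hfuel hlow hhigh
    by_cases hlh : lo < hi
    · have hmid : (lo + hi) / 2 < ecoTable.length := by omega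
      rw [bsLoop]
      simp only [hlh, if_true]
      rw [start_at _ hmid]
      by_cases hc : s.toList < (ecoTable[(lo + hi) / 2]).1.toList
      · simp only [hc, if_true]
        have hres := ih lo ((lo + hi) / 2) (by omega) (by omega) (by omega) hlow
          (fun j hj hmj => lt_of_lt_of_le hc (starts_mono hmid hj hmj))
        exact ⟨hres.1, le_trans hres.2.1 (by omega), hres.2.2⟩
      · simp only [hc, if_false]
        have hc' : (ecoTable[(lo + hi) / 2]).1.toList ≤ s.toList := le_of_not_gt hc
        have hres := ih ((lo + hi) / 2 + 1) hi (by omega) hhi (by omega)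
          (fun j hj hjm => le_trans (starts_mono hj hmid (by omega)) hc') hhigh
        exact ⟨le_trans (by omega) hres.1, hres.2.1, hres.2.2⟩
    · rw [bsLoop]
      simp only [hlh, if_false]
      have : lo = hi := by omega
      exact ⟨le_refl _, le_of_eq this, hlow, fun j hj hlj => hhigh j hj (this ▸ hlj)⟩

theorem scan_unknown (s : String) : ∀ (t : List (String × String × String)),
    (∀ q ∈ t, ¬(q.1.toList ≤ s.toList ∧ s.toList ≤ q.2.1.toList)) →
    scanT t s = "Unknown Opening" := by
  intro t
  induction t with
  | nil => intro _; rfl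
  | cons q rest ih =>
    intro h
    rw [scanT, if_neg (h q (List.mem_cons_self))]
    exact ih (fun p hp => h p (List.mem_cons_of_mem _ hp))

theorem scan_hit (s : String) : ∀ (t : List (String × String × String)) (k : Nat)
    (hk : k < t.length),
    ((t[k]).1.toList ≤ s.toList ∧ s.toList ≤ (t[k]).2.1.toList) →
    (∀ i (hi : i < t.length), i < k → ¬((t[i]).1.toList ≤ s.toList ∧ s.toList ≤ (t[i]).2.1.toList)) →
    scanT t s = (t[k]).2.2 := by
  intro t
  induction t with
  | nil => intro k hk; simp at hk
  | cons q rest ih =>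
    intro k hk hcond hmiss
    match k with
    | 0 => rw [scanT, if_pos (by simpa using hcond)]; simp
    | k + 1 =>
      rw [scanT, if_neg (by simpa using hmiss 0 (by omega) (by omega))]
      simpa using ih k (by simpa using hk) (by simpa using hcond)
        (fun i hi hik => by simpa using hmiss (i + 1) (by omega) (by omega))

theorem alt_eq_scan (s : String) : Eco_to_opening_alt s = scanT ecoTable s := by
  have hspec := bsLoop_spec s ecoRows.length 0 ecoRows.length (Nat.zero_le _)
    (le_of_eq rows_len) (by omega) (fun j hj hj0 => by omega)
    (fun j hj hlen => by rw [rows_len] at hlen; omega)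
  set r := bsLoop s ecoRows.length 0 ecoRows.length with hr
  obtain ⟨-, hrle, hlow, hhigh⟩ := hspec
  rw [rows_len] at hrle
  unfold Eco_to_opening_alt
  rw [← hr]
  rcases Nat.eq_zero_or_pos r with h0 | hpos
  · rw [if_neg (by omega)]
    refine (scan_unknown s ecoTable ?_).symm
    intro q hq
    obtain ⟨i, hi, rfl⟩ := List.getElem_of_mem hq
    rintro ⟨h1, -⟩
    exact absurd h1 (not_le_of_gt (hhigh i hi (by omega)))
  · have hk : r - 1 < ecoTable.length := by omega
    have hstart : (ecoTable[r - 1]).1.toList ≤ s.toList := hlow (r - 1) hk (by omega)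
    have hmiss : ∀ i (hi : i < ecoTable.length), i < r - 1 →
        ¬((ecoTable[i]).1.toList ≤ s.toList ∧ s.toList ≤ (ecoTable[i]).2.1.toList) := by
      rintro i hi hik ⟨h1, h2⟩
      exact absurd (lt_of_le_of_lt h2 (table_sep_get hi hk hik)) (not_lt_of_ge hstart)
    rw [if_pos hpos, stop_at _ hk, name_at _ hk]
    by_cases hend : s.toList ≤ (ecoTable[r - 1]).2.1.toList
    · rw [if_pos hend, scan_hit s ecoTable (r - 1) hk ⟨hstart, hend⟩ hmiss]
    · rw [if_neg hend]
      refine (scan_unknown s ecoTable ?_).symm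
      intro q hq
      obtain ⟨i, hi, rfl⟩ := List.getElem_of_mem hq
      rintro ⟨h1, h2⟩
      rcases Nat.lt_trichotomy i (r - 1) with hir | hir | hir
      · exact hmiss i hi hir ⟨h1, h2⟩
      · subst hir; exact hend h2
      · exact absurd h1 (not_le_of_gt (hhigh i hi (by omega)))

-- ===== VERDICT (by name: the statement is the Claim_ definition above) =====
theorem Eco_to_opening_spec : Claim_equal_Eco_to_opening := by
  intro s _
  unfold Spec_Eco_to_opening Eco_to_opening
  rw [lookup_eq_scan s ecoItems ecoTable ecoRel, alt_eq_scan]
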